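-- pv_equiv track=rewrite | github.com/Ryleylundeen/screen-print-color-separator | app.py | build_underbase
-- ===== SOURCE A (Python) =====
-- def dilate(mask, radius):
--     if radius <= 0:
--         return mask
--     h = len(mask)
--     w = len(mask[0]) if h else 0
--     out = [[0]*w for _ in range(h)]
--     r = radius
--     rr = r*r
--     offsets = []
--     for dy in range(-r, r+1):
--         for dx in range(-r, r+1):
--             if dx*dx + dy*dy <= rr:
--                 offsets.append((dx, dy))
--     for y in range(h):
--         for x in range(w):
--             v = 0
--             for dx, dy in offsets:
--                 nx, ny = x+dx, y+dy
--                 if 0 <= nx < w and 0 <= ny < h and mask[ny][nx] == 1: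
--                     v = 1
--                     break
--             out[y][x] = v
--     return out
--
-- def build_underbase(masks, spread_px):
--     if not masks:
--         return None
--     h = len(masks[0])
--     w = len(masks[0][0]) if h else 0
--     ub = [[0]*w for _ in range(h)]
--     for m in masks:
--         for y in range(h):
--             row_m = m[y]
--             row_u = ub[y]
--             for x in range(w):
--                 if row_m[x] == 1:
--                     row_u[x] = 1
--     ub = dilate(ub, spread_px)
--     return ub
-- ===== SOURCE B (Python) =====
-- def build_underbase(masks, spread_px):
--     if not masks:
--         return None
--     h = len(masks[0])
--     w = len(masks[0][0]) if h else 0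
--     seeds = set()
--     for m in masks:
--         for y in range(h):
--             row = m[y]
--             for x in range(w):
--                 if row[x] == 1:
--                     seeds.add((y, x))
--     if spread_px <= 0:
--         return [[1 if (y, x) in seeds else 0 for x in range(w)] for y in range(h)]
--     r = spread_px
--     rr = r * r
--     hit = set()
--     for (sy, sx) in seeds:
--         for dy in range(-r, r + 1):
--             k = rr - dy * dy
--             if k < 0:
--                 continue
--             ny = sy + dy
--             if 0 <= ny < h:
--                 for dx in range(-r, r + 1):
--                     if dx * dx <= k:
--                         nx = sx + dx
--                         if 0 <= nx < w:
--                             hit.add((ny, nx))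
--     return [[1 if (y, x) in hit else 0 for x in range(w)] for y in range(h)]
-- ===== Notes on version B (the rewrite author's own statement) =====
-- stated objective: faster
-- what changed: A scans, for every output pixel, a precomputed list of all disk offsets until one lands on a set pixel; B collects the set pixels once into a seed set, stamps the disk around each seed into a hit set, and renders the grid from membership, so dilation work scales with the number of set pixels instead of every pixel probing the whole disk.
import Mathlib
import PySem

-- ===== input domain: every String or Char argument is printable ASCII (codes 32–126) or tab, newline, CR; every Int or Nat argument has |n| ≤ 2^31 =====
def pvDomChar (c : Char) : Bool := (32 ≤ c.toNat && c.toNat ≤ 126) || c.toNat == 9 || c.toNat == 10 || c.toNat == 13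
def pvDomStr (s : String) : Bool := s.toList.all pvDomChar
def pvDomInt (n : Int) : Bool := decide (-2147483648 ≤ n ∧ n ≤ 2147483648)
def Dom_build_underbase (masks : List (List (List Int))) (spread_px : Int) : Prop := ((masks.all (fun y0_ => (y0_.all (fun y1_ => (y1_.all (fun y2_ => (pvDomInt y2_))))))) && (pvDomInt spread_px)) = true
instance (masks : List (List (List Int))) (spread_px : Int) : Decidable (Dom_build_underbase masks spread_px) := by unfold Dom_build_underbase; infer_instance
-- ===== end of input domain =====

-- B replaces A's per-pixel scan over all disk offsets by stamping the disk around each set pixel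
-- into a hit set and rendering from membership (objective: faster; dilation work scales with the
-- number of set pixels rather than with every pixel probing the whole disk).

-- ===== PORT A =====
-- helper: the inner 'for dx, dy in offsets: … break' loop of dilate (first hit returns 1)
def pvScanA (mask : List (List Int)) (h w : Nat) (y x : Nat) : List (Int × Int) → Int
  | [] => 0
  | (dx, dy) :: rest =>
      if 0 ≤ (x : Int) + dx ∧ (x : Int) + dx < (w : Int) ∧ 0 ≤ (y : Int) + dy ∧ (y : Int) + dy < (h : Int) ∧
         (mask.getD ((y : Int) + dy).toNat []).getD ((x : Int) + dx).toNat 0 = 1 then 1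
      else pvScanA mask h w y x rest

-- indexing mask[ny][nx] is guarded by 0 ≤ nx < w, 0 ≤ ny < h, so getD is exact there
def dilate (mask : List (List Int)) (radius : Int) : List (List Int) :=
  if radius ≤ 0 then mask
  else
    let h := mask.length
    let w := if h ≠ 0 then (mask.headD []).length else 0
    let out0 := List.replicate h (List.replicate w (0 : Int))
    let r := radius
    let rr := r * r
    let offsets := (PySem.List.pyRange (-r) (r + 1) 1).foldl (fun acc dy =>
        (PySem.List.pyRange (-r) (r + 1) 1).foldl (fun acc dx =>
          if dx * dx + dy * dy ≤ rr then acc ++ [(dx, dy)] else acc) acc) []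
    (List.range h).foldl (fun out y =>
      (List.range w).foldl (fun out x =>
        out.set y ((out.getD y []).set x (pvScanA mask h w y x offsets))) out) out0

-- m[y] and row_m[x] are in range under Pre_, so getD is exact there
def build_underbase (masks : List (List (List Int))) (spread_px : Int) : Option (List (List Int)) :=
  if masks = [] then none
  else
    let h := (masks.headD []).length
    let w := if h ≠ 0 then ((masks.headD []).headD []).length else 0
    let ub0 := List.replicate h (List.replicate w (0 : Int))
    let ub := masks.foldl (fun ub m =>
        (List.range h).foldl (fun ub y =>
          (List.range w).foldl (fun ub x =>
            if (m.getD y []).getD x 0 = 1 then ub.set y ((ub.getD y []).set x 1) else ub) ub) ub) ub0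
    some (dilate ub spread_px)

-- ===== PORT B =====
-- seeds/hit are Python sets of (row, col) pairs; the final grids read them only through membership
def build_underbase_alt (masks : List (List (List Int))) (spread_px : Int) : Option (List (List Int)) :=
  if masks = [] then none
  else
    let h := (masks.headD []).length
    let w := if h ≠ 0 then ((masks.headD []).headD []).length else 0
    let seeds : PySem.Set (Int × Int) := masks.foldl (fun s m =>
        (List.range h).foldl (fun s (y : Nat) =>
          (List.range w).foldl (fun s (x : Nat) =>
            if (m.getD y []).getD x 0 = 1 then PySem.Set.add s ((y : Int), (x : Int)) else s) s) s)
        PySem.Set.empty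
    if spread_px ≤ 0 then
      some ((List.range h).map (fun (y : Nat) => (List.range w).map (fun (x : Nat) =>
        if ((y : Int), (x : Int)) ∈ seeds then (1 : Int) else 0)))
    else
      let r := spread_px
      let rr := r * r
      let hit : PySem.Set (Int × Int) := seeds.foldl (fun hit p =>
        (PySem.List.pyRange (-r) (r + 1) 1).foldl (fun hit dy =>
          if rr - dy * dy < 0 then hit
          else if 0 ≤ p.1 + dy ∧ p.1 + dy < (h : Int) then
            (PySem.List.pyRange (-r) (r + 1) 1).foldl (fun hit dx =>
              if dx * dx ≤ rr - dy * dy then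
                if 0 ≤ p.2 + dx ∧ p.2 + dx < (w : Int) then PySem.Set.add hit (p.1 + dy, p.2 + dx)
                else hit
              else hit) hit
          else hit) hit) PySem.Set.empty
      some ((List.range h).map (fun (y : Nat) => (List.range w).map (fun (x : Nat) =>
        if ((y : Int), (x : Int)) ∈ hit then (1 : Int) else 0)))

-- ===== PRECONDITION & SPEC =====
-- Pre_ excludes exactly the ragged inputs on which the Python A raises IndexError
-- (some mask has fewer rows than masks[0], or a row shorter than masks[0][0]); B raises there too.
-- Both ports render those raising reads as getD defaults in the same way, so the equality theorem
-- happens not to need the Pre_ hypothesis; Pre_ delimits where the ports are faithful to the Pythons.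
def Pre_build_underbase (masks : List (List (List Int))) (spread_px : Int) : Prop :=
  masks = [] ∨
    (∀ m ∈ masks, (masks.headD []).length ≤ m.length ∧
      ∀ y < (masks.headD []).length,
        (if (masks.headD []).length ≠ 0 then ((masks.headD []).headD []).length else 0) ≤ (m.getD y []).length)
instance (masks : List (List (List Int))) (spread_px : Int) : Decidable (Pre_build_underbase masks spread_px) := by
  unfold Pre_build_underbase; infer_instance
def pvWitness_build_underbase : List (List (List Int)) × Int := ([[[1, 0], [0, 0]]], 1)
def Spec_build_underbase (masks : List (List (List Int))) (spread_px : Int) (out : Option (List (List Int))) : Prop := out = build_underbase_alt masks spread_px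
instance (masks : List (List (List Int))) (spread_px : Int) (out : Option (List (List Int))) : Decidable (Spec_build_underbase masks spread_px out) := by unfold Spec_build_underbase; infer_instance

-- ===== CLAIM (what is proved, stated in full; the proofs are below) =====
def Claim_equal_build_underbase : Prop := ∀ (masks : List (List (List Int))) (spread_px : Int), Dom_build_underbase masks spread_px → Pre_build_underbase masks spread_px → Spec_build_underbase masks spread_px (build_underbase masks spread_px)

-- ===== LEMMAS AND PROOFS =====

-- grid entry and shape
def pvE (g : List (List Int)) (y x : Nat) : Int := (g.getD y []).getD x 0
def pvShape (h w : Nat) (g : List (List Int)) : Prop := g.length = h ∧ ∀ row ∈ g, row.length = w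

theorem pvShape_replicate (h w : Nat) : pvShape h w (List.replicate h (List.replicate w (0 : Int))) := by
  refine ⟨List.length_replicate, fun row hr => ?_⟩
  rw [List.eq_of_mem_replicate hr]
  exact List.length_replicate

theorem pvE_replicate (h w : Nat) (y x : Nat) : pvE (List.replicate h (List.replicate w (0 : Int))) y x = 0 := by
  unfold pvE
  by_cases hy : y < h <;> by_cases hx : x < w <;>
    simp [List.getD_eq_getElem?_getD, hy, hx]

-- a fold that only ever adds elements: membership characterisation
theorem pv_mem_foldl {α β : Type} (l : List β) (F : List α → β → List α) (Q : β → α → Prop)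
    (hF : ∀ s b, b ∈ l → ∀ z, z ∈ F s b ↔ z ∈ s ∨ Q b z) (s : List α) (z : α) :
    z ∈ l.foldl F s ↔ z ∈ s ∨ ∃ b ∈ l, Q b z := by
  induction l generalizing s with
  | nil => simp
  | cons b t ih =>
      rw [List.foldl_cons, ih (fun s b hb => hF s b (List.mem_cons_of_mem _ hb)),
        hF s b List.mem_cons_self]
      simp only [List.mem_cons]
      constructor
      · rintro ((hz | hq) | ⟨b', hb', hq⟩)
        · exact Or.inl hz
        · exact Or.inr ⟨b, Or.inl rfl, hq⟩
        · exact Or.inr ⟨b', Or.inr hb', hq⟩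
      · rintro (hz | ⟨b', (rfl | hb'), hq⟩)
        · exact Or.inl (Or.inl hz)
        · exact Or.inl (Or.inr hq)
        · exact Or.inr ⟨b', hb', hq⟩

theorem pv_getD_set (l : List Int) (i j : Nat) (v d : Int) :
    (l.set i v).getD j d = if i = j ∧ i < l.length then v else l.getD j d := by
  rw [List.getD_eq_getElem?_getD, List.getD_eq_getElem?_getD, List.getElem?_set]
  by_cases h1 : i = j
  · subst h1
    by_cases h2 : i < l.length
    · simp [h2]
    · simp [h2]
  · simp [h1]

theorem pv_getD_set' (g : List (List Int)) (i j : Nat) (v : List Int) :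
    (g.set i v).getD j [] = if i = j ∧ i < g.length then v else g.getD j [] := by
  rw [List.getD_eq_getElem?_getD, List.getD_eq_getElem?_getD, List.getElem?_set]
  by_cases h1 : i = j
  · subst h1
    by_cases h2 : i < g.length
    · simp [h2]
    · simp [h2]
  · simp [h1]

theorem pvE_set {h w : Nat} {g : List (List Int)} (hs : pvShape h w g) {y x : Nat} (hy : y < h) (hx : x < w) (v : Int) :
    pvShape h w (g.set y ((g.getD y []).set x v)) ∧
    ∀ y' x', pvE (g.set y ((g.getD y []).set x v)) y' x' = if y' = y ∧ x' = x then v else pvE g y' x' := by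
  have hrow : (g.getD y []) ∈ g := by
    rw [List.getD_eq_getElem _ _ (by rw [hs.1]; exact hy)]
    exact List.getElem_mem _
  have hrl : (g.getD y []).length = w := hs.2 _ hrow
  refine ⟨⟨by rw [List.length_set]; exact hs.1, ?_⟩, ?_⟩
  · intro row hr
    rcases List.mem_or_eq_of_mem_set hr with hr' | rfl
    · exact hs.2 _ hr'
    · rw [List.length_set]; exact hrl
  · intro y' x'
    unfold pvE
    rw [pv_getD_set']
    by_cases hyy : y = y'
    · subst hyy
      rw [if_pos ⟨rfl, by rw [hs.1]; exact hy⟩, pv_getD_set, hrl]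
      by_cases hxx : x = x'
      · subst hxx
        rw [if_pos ⟨rfl, hx⟩, if_pos ⟨rfl, rfl⟩]
      · rw [if_neg (by tauto), if_neg (by tauto)]
    · rw [if_neg (by tauto), if_neg (by tauto)]

theorem pv_rowfold {h w : Nat} (y : Nat) (hy : y < h) (c : Nat → Prop) [DecidablePred c] (f : Nat → Int)
    (xs : List Nat) (hxs : ∀ x ∈ xs, x < w) :
    ∀ g, pvShape h w g →
      pvShape h w (xs.foldl (fun g x => if c x then g.set y ((g.getD y []).set x (f x)) else g) g) ∧
      ∀ y' x', pvE (xs.foldl (fun g x => if c x then g.set y ((g.getD y []).set x (f x)) else g) g) y' x' =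
        if y' = y ∧ x' ∈ xs ∧ c x' then f x' else pvE g y' x' := by
  induction xs with
  | nil => intro g hg; refine ⟨hg, fun y' x' => by simp⟩
  | cons x t ih =>
      intro g hg
      have hx : x < w := hxs x List.mem_cons_self
      have ht : ∀ x ∈ t, x < w := fun x hx' => hxs x (List.mem_cons_of_mem _ hx')
      rw [List.foldl_cons]
      by_cases hc : c x
      · rw [if_pos hc]
        obtain ⟨hsh1, he1⟩ := pvE_set hg hy hx (f x)
        obtain ⟨hsh2, he2⟩ := ih ht _ hsh1
        refine ⟨hsh2, fun y' x' => ?_⟩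
        rw [he2, he1]
        by_cases h1 : y' = y ∧ x' ∈ t ∧ c x'
        · rw [if_pos h1, if_pos ⟨h1.1, List.mem_cons_of_mem _ h1.2.1, h1.2.2⟩]
        · rw [if_neg h1]
          by_cases h2 : y' = y ∧ x' = x
          · rw [if_pos h2, if_pos ⟨h2.1, h2.2 ▸ List.mem_cons_self, h2.2 ▸ hc⟩, h2.2]
          · rw [if_neg h2, if_neg (by simp only [List.mem_cons]; tauto)]
      · rw [if_neg hc]
        obtain ⟨hsh2, he2⟩ := ih ht _ hg
        refine ⟨hsh2, fun y' x' => ?_⟩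
        rw [he2]
        by_cases h1 : y' = y ∧ x' ∈ t ∧ c x'
        · rw [if_pos h1, if_pos ⟨h1.1, List.mem_cons_of_mem _ h1.2.1, h1.2.2⟩]
        · rw [if_neg h1, if_neg ?_]
          simp only [List.mem_cons]
          rintro ⟨rfl, (rfl | hm), hcx⟩
          · exact hc hcx
          · exact h1 ⟨rfl, hm, hcx⟩

theorem pv_gridfold {h w : Nat} (c : Nat → Nat → Prop) [∀ y x, Decidable (c y x)] (f : Nat → Nat → Int)
    (ys : List Nat) (hys : ∀ y ∈ ys, y < h) :
    ∀ g, pvShape h w g →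
      pvShape h w (ys.foldl (fun g y => (List.range w).foldl
          (fun g x => if c y x then g.set y ((g.getD y []).set x (f y x)) else g) g) g) ∧
      ∀ y' x', pvE (ys.foldl (fun g y => (List.range w).foldl
          (fun g x => if c y x then g.set y ((g.getD y []).set x (f y x)) else g) g) g) y' x' =
        if y' ∈ ys ∧ x' < w ∧ c y' x' then f y' x' else pvE g y' x' := by
  induction ys with
  | nil => intro g hg; refine ⟨hg, fun y' x' => by simp⟩
  | cons y t ih =>
      intro g hg
      have hy : y < h := hys y List.mem_cons_self
      have ht : ∀ y ∈ t, y < h := fun y hy' => hys y (List.mem_cons_of_mem _ hy')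
      rw [List.foldl_cons]
      obtain ⟨hsh1, he1⟩ := pv_rowfold y hy (c y) (f y) (List.range w) (fun x hx => List.mem_range.mp hx) g hg
      obtain ⟨hsh2, he2⟩ := ih ht _ hsh1
      refine ⟨hsh2, fun y' x' => ?_⟩
      rw [he2, he1]
      by_cases h1 : y' ∈ t ∧ x' < w ∧ c y' x'
      · rw [if_pos h1, if_pos ⟨List.mem_cons_of_mem _ h1.1, h1.2⟩]
      · rw [if_neg h1]
        by_cases h2 : y' = y ∧ x' ∈ List.range w ∧ c y x'
        · obtain ⟨rfl, hm, hcx⟩ := h2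
          rw [if_pos ⟨rfl, hm, hcx⟩, if_pos ⟨List.mem_cons_self, List.mem_range.mp hm, hcx⟩]
        · rw [if_neg h2, if_neg ?_]
          simp only [List.mem_cons, List.mem_range] at *
          rintro ⟨(rfl | hm), hxw, hcx⟩
          · exact h2 ⟨rfl, hxw, hcx⟩
          · exact h1 ⟨hm, hxw, hcx⟩

def pvU (masks : List (List (List Int))) (y x : Nat) : Bool := masks.any (fun m => (m.getD y []).getD x 0 == 1)

-- the union loop of build_underbase
theorem pv_unionfold (h w : Nat) (ms : List (List (List Int))) :
    ∀ g, pvShape h w g →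
      pvShape h w (ms.foldl (fun ub m =>
        (List.range h).foldl (fun ub y =>
          (List.range w).foldl (fun ub x =>
            if (m.getD y []).getD x 0 = 1 then ub.set y ((ub.getD y []).set x 1) else ub) ub) ub) g) ∧
      ∀ y x, pvE (ms.foldl (fun ub m =>
        (List.range h).foldl (fun ub y =>
          (List.range w).foldl (fun ub x =>
            if (m.getD y []).getD x 0 = 1 then ub.set y ((ub.getD y []).set x 1) else ub) ub) ub) g) y x =
        if y < h ∧ x < w ∧ pvU ms y x = true then 1 else pvE g y x := by
  induction ms with
  | nil => intro g hg; refine ⟨hg, fun y x => by simp [pvU]⟩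
  | cons m t ih =>
      intro g hg
      rw [List.foldl_cons]
      obtain ⟨hsh1, he1⟩ := pv_gridfold (fun y x => (m.getD y []).getD x 0 = 1) (fun _ _ => (1 : Int))
        (List.range h) (fun y hy => List.mem_range.mp hy) g hg
      obtain ⟨hsh2, he2⟩ := ih _ hsh1
      refine ⟨hsh2, fun y x => ?_⟩
      rw [he2, he1]
      have hpu : (pvU (m :: t) y x = true) ↔ ((m.getD y []).getD x 0 = 1 ∨ pvU t y x = true) := by
        simp [pvU]
      by_cases h1 : y < h ∧ x < w ∧ pvU t y x = true
      · rw [if_pos h1, if_pos ⟨h1.1, h1.2.1, hpu.mpr (Or.inr h1.2.2)⟩]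
      · rw [if_neg h1]
        by_cases h2 : y ∈ List.range h ∧ x < w ∧ (m.getD y []).getD x 0 = 1
        · rw [if_pos h2, if_pos ⟨List.mem_range.mp h2.1, h2.2.1, hpu.mpr (Or.inl h2.2.2)⟩]
        · rw [if_neg h2, if_neg ?_]
          simp only [List.mem_range] at *
          rintro ⟨hyh, hxw, hu⟩
          rcases hpu.mp hu with hm | htl
          · exact h2 ⟨hyh, hxw, hm⟩
          · exact h1 ⟨hyh, hxw, htl⟩

-- the dilation output loop (unconditional per-pixel write)
theorem pv_gridfold_all {h w : Nat} (f : Nat → Nat → Int) (g : List (List Int)) (hg : pvShape h w g) :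
    pvShape h w ((List.range h).foldl (fun out y => (List.range w).foldl
        (fun out x => out.set y ((out.getD y []).set x (f y x))) out) g) ∧
    ∀ y x, pvE ((List.range h).foldl (fun out y => (List.range w).foldl
        (fun out x => out.set y ((out.getD y []).set x (f y x))) out) g) y x =
      if y < h ∧ x < w then f y x else pvE g y x := by
  have hcongr : (List.range h).foldl (fun out y => (List.range w).foldl
        (fun out x => out.set y ((out.getD y []).set x (f y x))) out) g =
      (List.range h).foldl (fun out y => (List.range w).foldl
        (fun out x => if (fun (_ _ : Nat) => True) y x then out.set y ((out.getD y []).set x (f y x)) else out) out) g := by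
    refine PySem.List.foldl_congr_mem _ _ _ _ (fun acc y _ => ?_)
    exact PySem.List.foldl_congr_mem _ _ _ _ (fun acc' x _ => by rw [if_pos trivial])
  rw [hcongr]
  obtain ⟨hsh, he⟩ := pv_gridfold (fun (_ _ : Nat) => True) f (List.range h)
    (fun y hy => List.mem_range.mp hy) g hg
  refine ⟨hsh, fun y x => ?_⟩
  rw [he y x]
  simp [List.mem_range]

theorem pvScanA_eq (mask : List (List Int)) (h w : Nat) (y x : Nat) (l : List (Int × Int)) :
    pvScanA mask h w y x l =
      if ∃ p ∈ l, 0 ≤ (x : Int) + p.1 ∧ (x : Int) + p.1 < (w : Int) ∧ 0 ≤ (y : Int) + p.2 ∧ (y : Int) + p.2 < (h : Int) ∧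
          (mask.getD ((y : Int) + p.2).toNat []).getD ((x : Int) + p.1).toNat 0 = 1 then 1 else 0 := by
  induction l with
  | nil => simp [pvScanA]
  | cons p rest ih =>
      obtain ⟨dx, dy⟩ := p
      rw [pvScanA]
      by_cases hc : 0 ≤ (x : Int) + dx ∧ (x : Int) + dx < (w : Int) ∧ 0 ≤ (y : Int) + dy ∧ (y : Int) + dy < (h : Int) ∧
          (mask.getD ((y : Int) + dy).toNat []).getD ((x : Int) + dx).toNat 0 = 1
      · rw [if_pos hc, if_pos ⟨(dx, dy), List.mem_cons_self, hc⟩]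
      · rw [if_neg hc, ih]
        refine if_congr ?_ rfl rfl
        constructor
        · rintro ⟨q, hq, hp⟩
          exact ⟨q, List.mem_cons_of_mem _ hq, hp⟩
        · rintro ⟨q, hq, hp⟩
          rcases List.mem_cons.mp hq with h1 | h1
          · subst h1; exact absurd hp hc
          · exact ⟨q, h1, hp⟩

theorem pv_mem_offsets (r rr : Int) (p : Int × Int) :
    p ∈ (PySem.List.pyRange (-r) (r + 1) 1).foldl (fun acc dy =>
        (PySem.List.pyRange (-r) (r + 1) 1).foldl (fun acc dx =>
          if dx * dx + dy * dy ≤ rr then acc ++ [(dx, dy)] else acc) acc) ([] : List (Int × Int)) ↔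
      (-r ≤ p.1 ∧ p.1 < r + 1) ∧ (-r ≤ p.2 ∧ p.2 < r + 1) ∧ p.1 * p.1 + p.2 * p.2 ≤ rr := by
  have hin : ∀ (dy : Int) (s : List (Int × Int)) (z : Int × Int),
      z ∈ (PySem.List.pyRange (-r) (r + 1) 1).foldl (fun acc dx =>
        if dx * dx + dy * dy ≤ rr then acc ++ [(dx, dy)] else acc) s ↔
      z ∈ s ∨ ∃ dx ∈ PySem.List.pyRange (-r) (r + 1) 1, dx * dx + dy * dy ≤ rr ∧ z = (dx, dy) := by
    intro dy s z
    refine pv_mem_foldl _ _ (fun dx z => dx * dx + dy * dy ≤ rr ∧ z = (dx, dy)) ?_ s z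
    intro s' dx _ z'
    split_ifs with hc
    · simp only [List.mem_append, List.mem_singleton]
      tauto
    · tauto
  rw [pv_mem_foldl _ _ (fun dy z => ∃ dx ∈ PySem.List.pyRange (-r) (r + 1) 1,
      dx * dx + dy * dy ≤ rr ∧ z = (dx, dy)) (fun s dy _ z => hin dy s z) _ p]
  constructor
  · rintro (h | ⟨dy, hdy, dx, hdx, hc, rfl⟩)
    · simp at h
    · rw [PySem.List.mem_pyRange_one] at hdy hdx
      exact ⟨hdx, hdy, hc⟩
  · rintro ⟨h1, h2, hc⟩
    refine Or.inr ⟨p.2, ?_, p.1, ?_, hc, rfl⟩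
    · rw [PySem.List.mem_pyRange_one]; exact h2
    · rw [PySem.List.mem_pyRange_one]; exact h1

-- rendering a grid with known entries as the map-comprehension
theorem pv_grid_ext (h w : Nat) (g : List (List Int)) (hs : pvShape h w g) (f : Nat → Nat → Int)
    (he : ∀ y < h, ∀ x < w, pvE g y x = f y x) :
    g = (List.range h).map (fun y => (List.range w).map (fun x => f y x)) := by
  apply List.ext_getElem
  · simp [hs.1]
  intro y hy1 hy2
  have hyh : y < h := hs.1 ▸ hy1
  have hrl : g[y].length = w := hs.2 _ (List.getElem_mem _)
  simp only [List.getElem_map, List.getElem_range]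
  apply List.ext_getElem
  · simp [hrl]
  intro x hx1 hx2
  simp only [List.getElem_map, List.getElem_range]
  have hxw : x < w := hrl ▸ hx1
  have h3 := he y hyh x hxw
  unfold pvE at h3
  rwa [List.getD_eq_getElem _ _ hy1, List.getD_eq_getElem _ _ hx1] at h3

theorem pv_mem_seeds (h w : Nat) (masks : List (List (List Int))) (z : Int × Int) :
    z ∈ masks.foldl (fun s m =>
        (List.range h).foldl (fun s (y : Nat) =>
          (List.range w).foldl (fun s (x : Nat) =>
            if (m.getD y []).getD x 0 = 1 then PySem.Set.add s ((y : Int), (x : Int)) else s) s) s)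
        PySem.Set.empty ↔
      ∃ y < h, ∃ x < w, z = ((y : Int), (x : Int)) ∧ pvU masks y x = true := by
  have hx : ∀ (m : List (List Int)) (y : Nat) (s : PySem.Set (Int × Int)) (z : Int × Int),
      z ∈ (List.range w).foldl (fun s (x : Nat) =>
        if (m.getD y []).getD x 0 = 1 then PySem.Set.add s ((y : Int), (x : Int)) else s) s ↔
      z ∈ s ∨ ∃ x ∈ List.range w, (m.getD y []).getD x 0 = 1 ∧ z = ((y : Int), (x : Int)) := by
    intro m y s z
    refine pv_mem_foldl _ _ (fun x z => (m.getD y []).getD x 0 = 1 ∧ z = ((y : Int), (x : Int))) ?_ s z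
    intro s' x _ z'
    split_ifs with hc
    · rw [PySem.Set.mem_add]; tauto
    · tauto
  have hy : ∀ (m : List (List Int)) (s : PySem.Set (Int × Int)) (z : Int × Int),
      z ∈ (List.range h).foldl (fun s (y : Nat) =>
        (List.range w).foldl (fun s (x : Nat) =>
          if (m.getD y []).getD x 0 = 1 then PySem.Set.add s ((y : Int), (x : Int)) else s) s) s ↔
      z ∈ s ∨ ∃ y ∈ List.range h, ∃ x ∈ List.range w, (m.getD y []).getD x 0 = 1 ∧ z = ((y : Int), (x : Int)) := by
    intro m s z
    exact pv_mem_foldl _ _ (fun y z => ∃ x ∈ List.range w, (m.getD y []).getD x 0 = 1 ∧ z = ((y : Int), (x : Int)))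
      (fun s y _ z => hx m y s z) s z
  rw [pv_mem_foldl _ _ (fun m z => ∃ y ∈ List.range h, ∃ x ∈ List.range w,
      (m.getD y []).getD x 0 = 1 ∧ z = ((y : Int), (x : Int))) (fun s m _ z => hy m s z) _ z]
  simp only [pvU, PySem.Set.empty, List.not_mem_nil, false_or, List.mem_range,
    List.any_eq_true, beq_iff_eq]
  constructor
  · rintro ⟨m, hm, y, hy', x, hx', he, rfl⟩
    exact ⟨y, hy', x, hx', rfl, m, hm, he⟩
  · rintro ⟨y, hy', x, hx', rfl, m, hm, he⟩
    exact ⟨m, hm, y, hy', x, hx', he, rfl⟩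

theorem pv_mem_hit (h w : Nat) (r rr : Int) (seeds : List (Int × Int)) (z : Int × Int) :
    z ∈ seeds.foldl (fun hit p =>
        (PySem.List.pyRange (-r) (r + 1) 1).foldl (fun hit dy =>
          if rr - dy * dy < 0 then hit
          else if 0 ≤ p.1 + dy ∧ p.1 + dy < (h : Int) then
            (PySem.List.pyRange (-r) (r + 1) 1).foldl (fun hit dx =>
              if dx * dx ≤ rr - dy * dy then
                if 0 ≤ p.2 + dx ∧ p.2 + dx < (w : Int) then PySem.Set.add hit (p.1 + dy, p.2 + dx)
                else hit
              else hit) hit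
          else hit) hit) PySem.Set.empty ↔
      ∃ p ∈ seeds, ∃ dy, (-r ≤ dy ∧ dy < r + 1) ∧ ¬ rr - dy * dy < 0 ∧ 0 ≤ p.1 + dy ∧ p.1 + dy < (h : Int) ∧
        ∃ dx, (-r ≤ dx ∧ dx < r + 1) ∧ dx * dx ≤ rr - dy * dy ∧ 0 ≤ p.2 + dx ∧ p.2 + dx < (w : Int) ∧
          z = (p.1 + dy, p.2 + dx) := by
  have hx : ∀ (p : Int × Int) (dy : Int) (s : PySem.Set (Int × Int)) (z : Int × Int),
      z ∈ (PySem.List.pyRange (-r) (r + 1) 1).foldl (fun hit dx =>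
        if dx * dx ≤ rr - dy * dy then
          if 0 ≤ p.2 + dx ∧ p.2 + dx < (w : Int) then PySem.Set.add hit (p.1 + dy, p.2 + dx)
          else hit
        else hit) s ↔
      z ∈ s ∨ ∃ dx ∈ PySem.List.pyRange (-r) (r + 1) 1, dx * dx ≤ rr - dy * dy ∧
        0 ≤ p.2 + dx ∧ p.2 + dx < (w : Int) ∧ z = (p.1 + dy, p.2 + dx) := by
    intro p dy s z
    refine pv_mem_foldl _ _ (fun dx z => dx * dx ≤ rr - dy * dy ∧
      0 ≤ p.2 + dx ∧ p.2 + dx < (w : Int) ∧ z = (p.1 + dy, p.2 + dx)) ?_ s z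
    intro s' dx _ z'
    split_ifs with hc1 hc2
    · rw [PySem.Set.mem_add]; tauto
    · tauto
    · tauto
  have hdy : ∀ (p : Int × Int) (s : PySem.Set (Int × Int)) (z : Int × Int),
      z ∈ (PySem.List.pyRange (-r) (r + 1) 1).foldl (fun hit dy =>
        if rr - dy * dy < 0 then hit
        else if 0 ≤ p.1 + dy ∧ p.1 + dy < (h : Int) then
          (PySem.List.pyRange (-r) (r + 1) 1).foldl (fun hit dx =>
            if dx * dx ≤ rr - dy * dy then
              if 0 ≤ p.2 + dx ∧ p.2 + dx < (w : Int) then PySem.Set.add hit (p.1 + dy, p.2 + dx)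
              else hit
            else hit) hit
        else hit) s ↔
      z ∈ s ∨ ∃ dy ∈ PySem.List.pyRange (-r) (r + 1) 1, ¬ rr - dy * dy < 0 ∧
        0 ≤ p.1 + dy ∧ p.1 + dy < (h : Int) ∧
        ∃ dx ∈ PySem.List.pyRange (-r) (r + 1) 1, dx * dx ≤ rr - dy * dy ∧
          0 ≤ p.2 + dx ∧ p.2 + dx < (w : Int) ∧ z = (p.1 + dy, p.2 + dx) := by
    intro p s z
    refine pv_mem_foldl _ _ (fun dy z => ¬ rr - dy * dy < 0 ∧ 0 ≤ p.1 + dy ∧ p.1 + dy < (h : Int) ∧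
      ∃ dx ∈ PySem.List.pyRange (-r) (r + 1) 1, dx * dx ≤ rr - dy * dy ∧
        0 ≤ p.2 + dx ∧ p.2 + dx < (w : Int) ∧ z = (p.1 + dy, p.2 + dx)) ?_ s z
    intro s' dy _ z'
    split_ifs with hc1 hc2
    · tauto
    · rw [hx p dy s' z']
      constructor
      · rintro (hz | hex)
        · exact Or.inl hz
        · exact Or.inr ⟨hc1, hc2.1, hc2.2, hex⟩
      · rintro (hz | ⟨_, _, _, hex⟩)
        · exact Or.inl hz
        · exact Or.inr hex
    · tauto
  rw [pv_mem_foldl _ _ (fun p z => ∃ dy ∈ PySem.List.pyRange (-r) (r + 1) 1, ¬ rr - dy * dy < 0 ∧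
      0 ≤ p.1 + dy ∧ p.1 + dy < (h : Int) ∧
      ∃ dx ∈ PySem.List.pyRange (-r) (r + 1) 1, dx * dx ≤ rr - dy * dy ∧
        0 ≤ p.2 + dx ∧ p.2 + dx < (w : Int) ∧ z = (p.1 + dy, p.2 + dx))
      (fun s p _ z => hdy p s z) _ z]
  simp only [PySem.Set.empty, List.not_mem_nil, false_or, PySem.List.mem_pyRange_one]

-- entries of the union grid
theorem pv_ub_entry (h w : Nat) (masks : List (List (List Int))) :
    ∀ y x, pvE (masks.foldl (fun ub m =>
        (List.range h).foldl (fun ub y =>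
          (List.range w).foldl (fun ub x =>
            if (m.getD y []).getD x 0 = 1 then ub.set y ((ub.getD y []).set x 1) else ub) ub) ub)
        (List.replicate h (List.replicate w (0 : Int)))) y x =
      if y < h ∧ x < w ∧ pvU masks y x = true then 1 else 0 := by
  intro y x
  obtain ⟨_, hE⟩ := pv_unionfold h w masks _ (pvShape_replicate h w)
  rw [hE, pvE_replicate]

-- seeds membership at a grid coordinate is the union predicate
theorem pv_seeds_at (h w : Nat) (masks : List (List (List Int))) (y x : Nat) (hy : y < h) (hx : x < w) :
    (((y : Int), (x : Int)) ∈ masks.foldl (fun s m =>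
        (List.range h).foldl (fun s (y : Nat) =>
          (List.range w).foldl (fun s (x : Nat) =>
            if (m.getD y []).getD x 0 = 1 then PySem.Set.add s ((y : Int), (x : Int)) else s) s) s)
        PySem.Set.empty) ↔ pvU masks y x = true := by
  rw [pv_mem_seeds]
  constructor
  · rintro ⟨y', _, x', _, heq, hU⟩
    have h1 : ((y : Int), (x : Int)).1 = ((y' : Int), (x' : Int)).1 := by rw [heq]
    have h2 : ((y : Int), (x : Int)).2 = ((y' : Int), (x' : Int)).2 := by rw [heq]
    simp only [] at h1 h2
    have hy' : y = y' := by exact_mod_cast h1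
    have hx' : x = x' := by exact_mod_cast h2
    subst hy'; subst hx'; exact hU
  · intro hU
    exact ⟨y, hy, x, hx, rfl, hU⟩

theorem pv_main (h w : Nat) (hw0 : h = 0 → w = 0) (masks : List (List (List Int))) (sp : Int) :
    some (dilate (masks.foldl (fun ub m =>
        (List.range h).foldl (fun ub y =>
          (List.range w).foldl (fun ub x =>
            if (m.getD y []).getD x 0 = 1 then ub.set y ((ub.getD y []).set x 1) else ub) ub) ub)
        (List.replicate h (List.replicate w (0 : Int)))) sp) =
      (if sp ≤ 0 then
        some ((List.range h).map (fun (y : Nat) => (List.range w).map (fun (x : Nat) =>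
          if ((y : Int), (x : Int)) ∈ masks.foldl (fun s m =>
              (List.range h).foldl (fun s (y : Nat) =>
                (List.range w).foldl (fun s (x : Nat) =>
                  if (m.getD y []).getD x 0 = 1 then PySem.Set.add s ((y : Int), (x : Int)) else s) s) s)
              PySem.Set.empty then (1 : Int) else 0)))
      else
        some ((List.range h).map (fun (y : Nat) => (List.range w).map (fun (x : Nat) =>
          if ((y : Int), (x : Int)) ∈ (masks.foldl (fun s m =>
              (List.range h).foldl (fun s (y : Nat) =>
                (List.range w).foldl (fun s (x : Nat) =>
                  if (m.getD y []).getD x 0 = 1 then PySem.Set.add s ((y : Int), (x : Int)) else s) s) s)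
              PySem.Set.empty).foldl (fun hit p =>
            (PySem.List.pyRange (-sp) (sp + 1) 1).foldl (fun hit dy =>
              if sp * sp - dy * dy < 0 then hit
              else if 0 ≤ p.1 + dy ∧ p.1 + dy < (h : Int) then
                (PySem.List.pyRange (-sp) (sp + 1) 1).foldl (fun hit dx =>
                  if dx * dx ≤ sp * sp - dy * dy then
                    if 0 ≤ p.2 + dx ∧ p.2 + dx < (w : Int) then PySem.Set.add hit (p.1 + dy, p.2 + dx)
                    else hit
                  else hit) hit
              else hit) hit) PySem.Set.empty then (1 : Int) else 0)))) := by
  obtain ⟨hsh, -⟩ := pv_unionfold h w masks _ (pvShape_replicate h w)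
  have hUBE := pv_ub_entry h w masks
  by_cases hsp : sp ≤ 0
  · rw [if_pos hsp]
    unfold dilate
    rw [if_pos hsp]
    refine congrArg some (pv_grid_ext h w _ hsh _ ?_)
    intro y hy x hx
    rw [hUBE y x]
    refine if_congr ?_ rfl rfl
    rw [pv_seeds_at h w masks y x hy hx]
    tauto
  · rw [if_neg hsp]
    unfold dilate
    rw [if_neg hsp]
    dsimp only
    rw [hsh.1]
    have hw' : (if h ≠ 0 then ((masks.foldl (fun ub m =>
        (List.range h).foldl (fun ub y =>
          (List.range w).foldl (fun ub x =>
            if (m.getD y []).getD x 0 = 1 then ub.set y ((ub.getD y []).set x 1) else ub) ub) ub)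
        (List.replicate h (List.replicate w (0 : Int)))).headD []).length else 0) = w := by
      by_cases h0 : h = 0
      · simp [h0, hw0 h0]
      · rw [if_pos h0]
        have hlen : 0 < (masks.foldl (fun ub m =>
            (List.range h).foldl (fun ub y =>
              (List.range w).foldl (fun ub x =>
                if (m.getD y []).getD x 0 = 1 then ub.set y ((ub.getD y []).set x 1) else ub) ub) ub)
            (List.replicate h (List.replicate w (0 : Int)))).length := by rw [hsh.1]; omega
        have hhd : (masks.foldl (fun ub m =>
            (List.range h).foldl (fun ub y =>
              (List.range w).foldl (fun ub x =>
                if (m.getD y []).getD x 0 = 1 then ub.set y ((ub.getD y []).set x 1) else ub) ub) ub)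
            (List.replicate h (List.replicate w (0 : Int)))).headD [] = (masks.foldl (fun ub m =>
            (List.range h).foldl (fun ub y =>
              (List.range w).foldl (fun ub x =>
                if (m.getD y []).getD x 0 = 1 then ub.set y ((ub.getD y []).set x 1) else ub) ub) ub)
            (List.replicate h (List.replicate w (0 : Int)))).getD 0 [] := by
          generalize (masks.foldl _ _ : List (List Int)) = L
          cases L <;> simp
        rw [hhd, List.getD_eq_getElem _ _ hlen]
        exact hsh.2 _ (List.getElem_mem _)
    rw [hw']
    obtain ⟨hsh2, hE2⟩ := pv_gridfold_all (h := h) (w := w)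
      (fun y x => pvScanA (masks.foldl (fun ub m =>
        (List.range h).foldl (fun ub y =>
          (List.range w).foldl (fun ub x =>
            if (m.getD y []).getD x 0 = 1 then ub.set y ((ub.getD y []).set x 1) else ub) ub) ub)
        (List.replicate h (List.replicate w (0 : Int)))) h w y x
        ((PySem.List.pyRange (-sp) (sp + 1) 1).foldl (fun acc dy =>
          (PySem.List.pyRange (-sp) (sp + 1) 1).foldl (fun acc dx =>
            if dx * dx + dy * dy ≤ sp * sp then acc ++ [(dx, dy)] else acc) acc) []))
      _ (pvShape_replicate h w)
    refine congrArg some (pv_grid_ext h w _ hsh2 _ ?_)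
    intro y hy x hx
    rw [hE2 y x, if_pos ⟨hy, hx⟩, pvScanA_eq]
    refine if_congr ?_ rfl rfl
    rw [pv_mem_hit]
    constructor
    · rintro ⟨p, hp, hb1, hb2, hb3, hb4, hent⟩
      rw [pv_mem_offsets] at hp
      obtain ⟨⟨hp1, hp2⟩, ⟨hp3, hp4⟩, hpc⟩ := hp
      have hent2 : (if ((y : Int) + p.2).toNat < h ∧ ((x : Int) + p.1).toNat < w ∧
          pvU masks ((y : Int) + p.2).toNat ((x : Int) + p.1).toNat = true then (1 : Int) else 0) = 1 := by
        rw [← pv_ub_entry h w masks]; exact hent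
      have hent3 : ((y : Int) + p.2).toNat < h ∧ ((x : Int) + p.1).toNat < w ∧
          pvU masks ((y : Int) + p.2).toNat ((x : Int) + p.1).toNat = true := by
        by_contra hC
        rw [if_neg hC] at hent2
        exact absurd hent2 (by norm_num)
      obtain ⟨hyh2, hxw2, hU⟩ := hent3
      refine ⟨(((((y : Int) + p.2).toNat : Nat) : Int), ((((x : Int) + p.1).toNat : Nat) : Int)),
        (pv_mem_seeds h w masks _).mpr ⟨_, hyh2, _, hxw2, rfl, hU⟩, -p.2, ⟨by omega, by omega⟩, ?_,
        by omega, by omega, -p.1, ⟨by omega, by omega⟩, ?_, by omega, by omega, ?_⟩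
      · simp only [neg_mul_neg]
        have := mul_self_nonneg p.1
        omega
      · simp only [neg_mul_neg]
        have := mul_self_nonneg p.1
        omega
      · rw [Prod.mk.injEq]
        constructor <;> omega
    · rintro ⟨q, hq, dy, ⟨hdy1, hdy2⟩, hk, hb1, hb2, dx, ⟨hdx1, hdx2⟩, hdxk, hb3, hb4, heq⟩
      rw [pv_mem_seeds] at hq
      obtain ⟨sy, hsy, sx, hsx, rfl, hU⟩ := hq
      simp only [] at hb1 hb2 hb3 hb4 heq hdxk
      have hy1 : (y : Int) = (sy : Int) + dy := by
        have := congrArg Prod.fst heq; simpa using this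
      have hx1 : (x : Int) = (sx : Int) + dx := by
        have := congrArg Prod.snd heq; simpa using this
      refine ⟨(-dx, -dy), ?_, by omega, by omega, by omega, by omega, ?_⟩
      · rw [pv_mem_offsets]
        refine ⟨⟨by omega, by omega⟩, ⟨by omega, by omega⟩, ?_⟩
        simp only [neg_mul_neg]
        omega
      · have hty : ((y : Int) + -dy).toNat = sy := by omega
        have htx : ((x : Int) + -dx).toNat = sx := by omega
        have := pv_ub_entry h w masks ((y : Int) + -dy).toNat ((x : Int) + -dx).toNat
        unfold pvE at this
        rw [this, hty, htx, if_pos ⟨hsy, hsx, hU⟩]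

-- ===== VERDICT (by name: the statement is the Claim_ definition above) =====
theorem build_underbase_spec : Claim_equal_build_underbase := by
  unfold Claim_equal_build_underbase
  intro masks spread_px _ _
  unfold Spec_build_underbase build_underbase build_underbase_alt
  by_cases hm : masks = []
  · rw [if_pos hm, if_pos hm]
  rw [if_neg hm, if_neg hm]
  dsimp only
  exact pv_main (masks.headD []).length
    (if (masks.headD []).length ≠ 0 then ((masks.headD []).headD []).length else 0)
    (fun h0 => by rw [h0]; simp) masks spread_px
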